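-- pv_equiv track=rewrite | github.com/dtadpole/symposium | symposium/clients/playwright/reply_extractor.py | diff_candidates
-- ===== SOURCE A (Python) =====
-- from typing import Any
--
-- def diff_candidates(before: list[dict[str, Any]], after: list[dict[str, Any]]) -> list[dict[str, Any]]:
--     before_texts = {b.get("text", "") for b in before}
--     out = []
--     for cand in after:
--         text = cand.get("text", "")
--         if text not in before_texts:
--             cand = dict(cand)
--             cand["delta"] = "new"
--             out.append(cand)
--             continue
--         # expanded block: same prefix exists in before but now longer
--         for old in before:
--             old_text = old.get("text", "")
--             if old_text and text.startswith(old_text) and len(text) > len(old_text) + 20: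
--                 cand = dict(cand)
--                 cand["delta"] = f"expanded:+{len(text)-len(old_text)}"
--                 out.append(cand)
--                 break
--     return out
-- ===== SOURCE B (Python) =====
-- def diff_candidates(before, after):
--     # first_idx maps each before-text to the index of its first occurrence in `before`
--     first_idx = {}
--     for i, b in enumerate(before):
--         first_idx.setdefault(b.get("text", ""), i)
--     out = []
--     for cand in after:
--         text = cand.get("text", "")
--         if text not in first_idx:
--             c = dict(cand)
--             c["delta"] = "new"
--             out.append(c)
--             continue
--         # earliest before-entry (by index) whose text is a proper prefix of `text`
--         # shorter by more than 20 characters, found by prefix lookups instead of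
--         # scanning all of `before` per candidate
--         best = None  # (before index, prefix length)
--         for k in range(1, len(text) - 20):
--             i = first_idx.get(text[:k])
--             if i is not None and (best is None or i < best[0]):
--                 best = (i, k)
--         if best is not None:
--             c = dict(cand)
--             c["delta"] = f"expanded:+{len(text) - best[1]}"
--             out.append(c)
--     return out
-- ===== Notes on version B (the rewrite author's own statement) =====
-- stated objective: alternative
-- what changed: Replaces A's per-candidate linear scan over `before` with a dict mapping each before-text to its first index, built once; each candidate is then resolved by prefix lookups in that dict, taking the hit with the smallest index.
import Mathlib
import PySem

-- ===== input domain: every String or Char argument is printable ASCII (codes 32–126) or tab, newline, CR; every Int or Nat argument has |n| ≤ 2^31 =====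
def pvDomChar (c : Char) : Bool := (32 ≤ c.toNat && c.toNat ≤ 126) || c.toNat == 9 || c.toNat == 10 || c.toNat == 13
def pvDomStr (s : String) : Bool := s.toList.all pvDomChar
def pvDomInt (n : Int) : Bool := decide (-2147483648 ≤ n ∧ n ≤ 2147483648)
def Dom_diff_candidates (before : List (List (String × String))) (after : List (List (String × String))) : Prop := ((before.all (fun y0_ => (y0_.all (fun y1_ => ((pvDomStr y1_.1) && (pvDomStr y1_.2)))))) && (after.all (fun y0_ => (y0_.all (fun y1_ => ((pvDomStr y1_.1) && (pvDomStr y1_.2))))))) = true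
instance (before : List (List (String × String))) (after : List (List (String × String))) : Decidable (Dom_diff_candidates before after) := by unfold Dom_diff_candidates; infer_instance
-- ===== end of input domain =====

-- B replaces A's per-candidate scan over `before` with a dict mapping each before-text to its
-- first index, queried once per prefix of the candidate; return values proved identical.

-- ===== PORT A =====
-- cand.get("text", "")  (a Python dict is modelled as its pair list; dict(...) = Dict.ofList)
def pvText (cand : List (String × String)) : String :=
  (PySem.Dict.ofList cand).getD "text" ""

-- cand = dict(cand); cand["delta"] = v  — the copied dict with "delta" set, as a pair list
def pvWithDelta (cand : List (String × String)) (v : String) : List (String × String) :=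
  ((PySem.Dict.ofList cand).insert "delta" v).items

-- A's inner 'for old in before: … append; break' loop: at most one appended row
def pvScanA (text : String) (cand : List (String × String)) :
    List (List (String × String)) → List (List (String × String))
  | [] => []
  | old :: rest =>
    let old_text := pvText old
    if old_text ≠ "" ∧ PySem.Str.startswith text old_text = true ∧
        PySem.Str.len text > PySem.Str.len old_text + 20 then
      [pvWithDelta cand
        ("expanded:+" ++ PySem.Int.toStr (PySem.Str.len text - PySem.Str.len old_text))]
    else pvScanA text cand rest

def diff_candidates (before : List (List (String × String))) (after : List (List (String × String))) : List (List (String × String)) :=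
  let before_texts : PySem.Set String := PySem.Set.ofList (before.map (fun b => pvText b))
  after.foldl (fun out cand =>
    let text := pvText cand
    if ¬ (PySem.Set.contains before_texts text = true) then
      out ++ [pvWithDelta cand "new"]
    else
      out ++ pvScanA text cand before) []

-- ===== PORT B =====
-- first_idx: each before-text ↦ index of its first occurrence (dict built with setdefault)
def pvFirstIdx (before : List (List (String × String))) : PySem.Dict String Int :=
  (PySem.List.enumerate before 0).foldl
    (fun d p => d.setdefault (pvText p.2) p.1) PySem.Dict.empty

-- best = None; for k in range(1, len(text) - 20): i = first_idx.get(text[:k]); keep the smallest i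
def pvBestB (first_idx : PySem.Dict String Int) (text : String) : Option (Int × Int) :=
  (PySem.List.pyRange 1 (PySem.Str.len text - 20) 1).foldl
    (fun best k =>
      match first_idx.get? (PySem.Str.slice text none (some k)) with
      | none => best
      | some i =>
        match best with
        | none => some (i, k)
        | some b => if i < b.1 then some (i, k) else best) none

def diff_candidates_alt (before : List (List (String × String))) (after : List (List (String × String))) : List (List (String × String)) :=
  let first_idx := pvFirstIdx before
  after.foldl (fun out cand =>
    let text := pvText cand
    if ¬ (first_idx.contains text = true) then
      out ++ [pvWithDelta cand "new"]
    else
      match pvBestB first_idx text with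
      | none => out
      | some b =>
        out ++ [pvWithDelta cand
          ("expanded:+" ++ PySem.Int.toStr (PySem.Str.len text - b.2))]) []

-- ===== PRECONDITION & SPEC =====
def Spec_diff_candidates (before : List (List (String × String))) (after : List (List (String × String))) (out : List (List (String × String))) : Prop := out = diff_candidates_alt before after
instance (before : List (List (String × String))) (after : List (List (String × String))) (out : List (List (String × String))) : Decidable (Spec_diff_candidates before after out) := by unfold Spec_diff_candidates; infer_instance

-- ===== CLAIM (what is proved, stated in full; the proofs are below) =====
def Claim_equal_diff_candidates : Prop := ∀ (before : List (List (String × String))) (after : List (List (String × String))), Dom_diff_candidates before after → Spec_diff_candidates before after (diff_candidates before after)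

-- ===== LEMMAS AND PROOFS =====

-- A's inner-loop condition, as a Bool predicate on the old text
def pvQ (t : String) (x : String) : Bool :=
  decide (x ≠ "") && PySem.Str.startswith t x && decide (PySem.Str.len t > PySem.Str.len x + 20)

theorem pvScanA_eq_find? (t : String) (cand : List (String × String))
    (bs : List (List (String × String))) :
    pvScanA t cand bs =
      match (bs.map pvText).find? (pvQ t) with
      | some x => [pvWithDelta cand
          ("expanded:+" ++ PySem.Int.toStr (PySem.Str.len t - PySem.Str.len x))]
      | none => [] := by
  induction bs with
  | nil => rfl
  | cons b rest ih =>
    simp only [pvScanA, List.map_cons, List.find?_cons, pvQ]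
    by_cases h : pvText b ≠ "" ∧ PySem.Str.startswith t (pvText b) = true ∧
        PySem.Str.len t > PySem.Str.len (pvText b) + 20
    · rw [if_pos h]
      have : (decide (pvText b ≠ "") && PySem.Str.startswith t (pvText b) &&
          decide (PySem.Str.len t > PySem.Str.len (pvText b) + 20)) = true := by
        simp only [Bool.and_eq_true, decide_eq_true_eq]
        exact ⟨⟨h.1, h.2.1⟩, h.2.2⟩
      rw [this]
    · rw [if_neg h]
      have : (decide (pvText b ≠ "") && PySem.Str.startswith t (pvText b) &&
          decide (PySem.Str.len t > PySem.Str.len (pvText b) + 20)) = false := by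
        by_contra hc
        simp only [Bool.not_eq_false, Bool.and_eq_true, decide_eq_true_eq] at hc
        exact h ⟨hc.1.1, hc.1.2, hc.2⟩
      rw [this]
      exact ih

-- the first_idx dict looks up the first index of a text
theorem pvFirstIdx_get?_aux (s : String) (bs : List (List (String × String))) :
    ∀ (n : Int) (d0 : PySem.Dict String Int),
      ((PySem.List.enumerate bs n).foldl
          (fun d p => d.setdefault (pvText p.2) p.1) d0).get? s =
        (d0.get? s).or (((bs.map pvText).findIdx? (· == s)).map (fun (j : Nat) => n + (j : Int))) := by
  induction bs with
  | nil => intro n d0; simp [PySem.List.enumerate]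
  | cons b rest ih =>
    intro n d0
    rw [PySem.List.enumerate_cons]
    simp only [List.foldl_cons, List.map_cons, List.findIdx?_cons]
    by_cases h : pvText b = s
    · subst h
      rw [ih]
      rw [PySem.Dict.get?_setdefault_self]
      simp only [beq_self_eq_true, if_pos]
      cases hd : d0.get? (pvText b) with
      | none => simp
      | some v => simp
    · rw [ih]
      rw [PySem.Dict.get?_setdefault_of_ne _ _ (fun hc => h hc.symm)]
      have hne : (pvText b == s) = false := by simp [h]
      rw [hne, if_neg (by simp)]
      cases hf : (rest.map pvText).findIdx? (· == s) with
      | none => simp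
      | some j =>
        simp only [Option.map_some]
        have : n + 1 + (j : Int) = n + ((j : Int) + 1) := by ring
        simp [this]

theorem pvFirstIdx_get? (bs : List (List (String × String))) (s : String) :
    (pvFirstIdx bs).get? s = ((bs.map pvText).findIdx? (· == s)).map (fun (j : Nat) => (j : Int)) := by
  unfold pvFirstIdx
  rw [pvFirstIdx_get?_aux]
  simp [PySem.Dict.get?_empty]

theorem pvFirstIdx_contains (bs : List (List (String × String))) (s : String) :
    (pvFirstIdx bs).contains s = true ↔ s ∈ bs.map pvText := by
  cases hf : List.findIdx? (fun x => x == s) (List.map pvText bs) with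
  | none =>
    rw [PySem.Dict.contains_eq_isSome_get?, pvFirstIdx_get?, hf]
    rw [List.findIdx?_eq_none_iff] at hf
    simp only [Option.map_none, Option.isSome_none]
    constructor
    · intro h; cases h
    · intro hmem
      have := hf s hmem
      simp at this
  | some j =>
    rw [PySem.Dict.contains_eq_isSome_get?, pvFirstIdx_get?, hf]
    rw [List.findIdx?_eq_some_iff_getElem] at hf
    obtain ⟨hlt, hp, _⟩ := hf
    simp only [Option.map_some, Option.isSome_some]
    constructor
    · intro _
      have : (bs.map pvText)[j] = s := by simpa using hp
      exact this ▸ List.getElem_mem hlt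
    · intro _; trivial

-- ---- the min-fold of pvBestB ----
def pvStep (g : Int → Option Int) (best : Option (Int × Int)) (k : Int) : Option (Int × Int) :=
  match g k with
  | none => best
  | some i =>
    match best with
    | none => some (i, k)
    | some b => if i < b.1 then some (i, k) else best

theorem pvBestB_eq (d : PySem.Dict String Int) (t : String) :
    pvBestB d t = (PySem.List.pyRange 1 (PySem.Str.len t - 20) 1).foldl
      (pvStep (fun k => d.get? (PySem.Str.slice t none (some k)))) none := rfl

theorem pvStep_none_iff (g : Int → Option Int) (best : Option (Int × Int)) (k : Int) :
    pvStep g best k = none ↔ best = none ∧ g k = none := by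
  cases hg : g k with
  | none => simp [pvStep, hg]
  | some i =>
    cases best with
    | none => simp [pvStep, hg]
    | some b =>
      simp only [pvStep, hg]
      split <;> simp

theorem pvStep_some_src (g : Int → Option Int) (best : Option (Int × Int)) (k : Int)
    (r : Int × Int) (h : pvStep g best k = some r) :
    best = some r ∨ (g k = some r.1 ∧ r.2 = k) := by
  cases hg : g k with
  | none => simp only [pvStep, hg] at h; exact Or.inl h
  | some i =>
    cases best with
    | none =>
      simp only [pvStep, hg, Option.some.injEq] at h
      exact Or.inr ⟨by rw [← h], by rw [← h]⟩
    | some b =>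
      simp only [pvStep, hg] at h
      split at h
      · simp only [Option.some.injEq] at h
        exact Or.inr ⟨by rw [← h], by rw [← h]⟩
      · exact Or.inl h

theorem pvStep_le (g : Int → Option Int) (best : Option (Int × Int)) (k : Int) :
    (∀ b, best = some b → ∃ b', pvStep g best k = some b' ∧ b'.1 ≤ b.1) ∧
    (∀ i, g k = some i → ∃ b', pvStep g best k = some b' ∧ b'.1 ≤ i) := by
  constructor
  · intro b hb
    subst hb
    cases hg : g k with
    | none => exact ⟨b, by simp [pvStep, hg], le_refl _⟩
    | some i =>
      by_cases hlt : i < b.1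
      · exact ⟨(i, k), by simp [pvStep, hg, hlt], le_of_lt hlt⟩
      · exact ⟨b, by simp [pvStep, hg, hlt], le_refl _⟩
  · intro i hi
    cases best with
    | none => exact ⟨(i, k), by simp [pvStep, hi], le_refl _⟩
    | some b =>
      by_cases hlt : i < b.1
      · exact ⟨(i, k), by simp [pvStep, hi, hlt], le_refl _⟩
      · exact ⟨b, by simp [pvStep, hi, hlt], by omega⟩

theorem pvFold_none_iff (g : Int → Option Int) (ks : List Int) :
    ∀ best, ks.foldl (pvStep g) best = none ↔ best = none ∧ ∀ k ∈ ks, g k = none := by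
  induction ks with
  | nil => intro best; simp
  | cons k0 ks ih =>
    intro best
    simp only [List.foldl_cons, List.mem_cons]
    rw [ih]
    rw [pvStep_none_iff]
    constructor
    · rintro ⟨⟨h1, h2⟩, h3⟩
      exact ⟨h1, fun k hk => hk.elim (fun he => he ▸ h2) (h3 k)⟩
    · rintro ⟨h1, h2⟩
      exact ⟨⟨h1, h2 k0 (Or.inl rfl)⟩, fun k hk => h2 k (Or.inr hk)⟩

theorem pvFold_some_src (g : Int → Option Int) (ks : List Int) :
    ∀ best r, ks.foldl (pvStep g) best = some r →
      best = some r ∨ (r.2 ∈ ks ∧ g r.2 = some r.1) := by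
  induction ks with
  | nil => intro best r h; exact Or.inl h
  | cons k0 ks ih =>
    intro best r h
    simp only [List.foldl_cons] at h
    rcases ih _ r h with h' | h'
    · rcases pvStep_some_src g best k0 r h' with h'' | ⟨hgk, hr2⟩
      · exact Or.inl h''
      · exact Or.inr ⟨by rw [hr2]; exact List.mem_cons_self, by rw [hr2]; exact hgk⟩
    · exact Or.inr ⟨List.mem_cons_of_mem _ h'.1, h'.2⟩

theorem pvFold_some_min (g : Int → Option Int) (ks : List Int) :
    ∀ best r, ks.foldl (pvStep g) best = some r →
      (∀ b, best = some b → r.1 ≤ b.1) ∧ (∀ k ∈ ks, ∀ i, g k = some i → r.1 ≤ i) := by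
  induction ks with
  | nil =>
    intro best r h
    exact ⟨fun b hb => by rw [hb] at h; simp_all, fun k hk => by simp at hk⟩
  | cons k0 ks ih =>
    intro best r h
    simp only [List.foldl_cons] at h
    obtain ⟨hbest, htail⟩ := ih _ r h
    refine ⟨fun b hb => ?_, fun k hk i hg => ?_⟩
    · obtain ⟨b', hb', hle⟩ := (pvStep_le g best k0).1 b hb
      exact le_trans (hbest b' hb') hle
    · rcases List.mem_cons.mp hk with he | hm
      · obtain ⟨b', hb', hle⟩ := (pvStep_le g best k0).2 i (he ▸ hg)
        exact le_trans (hbest b' hb') hle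
      · exact htail k hm i hg

-- ---- prefix facts ----
theorem pvPrefix_toList (t : String) (k : Int) (hk1 : 1 ≤ k) :
    (PySem.Str.slice t none (some k)).toList = t.toList.take k.toNat := by
  rw [PySem.Str.toList_slice]
  rw [PySem.Chars.slice_eq_listSlice]
  exact PySem.List.slice_to _ (by omega)

theorem pvQ_of_range (t : String) (k : Int) (hk1 : 1 ≤ k)
    (hk2 : k < PySem.Str.len t - 20) :
    pvQ t (PySem.Str.slice t none (some k)) = true := by
  have hlen : PySem.Str.len t = (t.toList.length : Int) := PySem.Str.len_eq t
  have hkL : k.toNat < t.toList.length := by omega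
  have htl : (PySem.Str.slice t none (some k)).toList = t.toList.take k.toNat :=
    pvPrefix_toList t k hk1
  have hplen : (PySem.Str.slice t none (some k)).toList.length = k.toNat := by
    rw [htl, List.length_take]; omega
  unfold pvQ
  have h1 : (PySem.Str.slice t none (some k)) ≠ "" := by
    intro he
    rw [he] at hplen
    simp at hplen
    omega
  have h2 : PySem.Str.startswith t (PySem.Str.slice t none (some k)) = true := by
    rw [PySem.Str.startswith_eq, PySem.Chars.startswith_iff, htl]
    exact List.take_prefix _ _
  have h3 : PySem.Str.len t > PySem.Str.len (PySem.Str.slice t none (some k)) + 20 := by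
    rw [hlen, PySem.Str.len_eq (PySem.Str.slice t none (some k))]
    rw [hplen]
    omega
  simp only [Bool.and_eq_true, decide_eq_true_eq]
  exact ⟨⟨h1, h2⟩, h3⟩

theorem pvQ_char (t x : String) (hx : pvQ t x = true) :
    x = PySem.Str.slice t none (some (PySem.Str.len x)) ∧
    1 ≤ PySem.Str.len x ∧ PySem.Str.len x < PySem.Str.len t - 20 := by
  unfold pvQ at hx
  simp only [Bool.and_eq_true, decide_eq_true_eq] at hx
  obtain ⟨⟨hne, hsw⟩, hlt⟩ := hx
  have hlx : PySem.Str.len x = (x.toList.length : Int) := PySem.Str.len_eq x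
  have hxne : x.toList ≠ [] := by
    intro he
    apply hne
    rw [← String.toList_inj]
    simpa using he
  have h1 : 1 ≤ PySem.Str.len x := by
    rw [hlx]
    have : 0 < x.toList.length := List.length_pos_of_ne_nil hxne
    omega
  have h2 : PySem.Str.len x < PySem.Str.len t - 20 := by omega
  refine ⟨?_, h1, h2⟩
  rw [PySem.Str.startswith_eq, PySem.Chars.startswith_iff] at hsw
  have := List.prefix_iff_eq_take.mp hsw
  rw [← String.toList_inj, pvPrefix_toList t _ h1]
  rw [hlx]
  simpa using this

-- findIdx? over texts of pvQ is exactly what both sides compute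
theorem pvInner_none (bs : List (List (String × String))) (t : String)
    (hnone : (bs.map pvText).findIdx? (pvQ t) = none) :
    pvBestB (pvFirstIdx bs) t = none := by
  rw [pvBestB_eq]
  rw [pvFold_none_iff]
  refine ⟨rfl, fun k hk => ?_⟩
  rw [PySem.List.mem_pyRange_one] at hk
  rw [pvFirstIdx_get?]
  cases hf : (bs.map pvText).findIdx? (· == PySem.Str.slice t none (some k)) with
  | none => rfl
  | some j =>
    exfalso
    rw [List.findIdx?_eq_some_iff_getElem] at hf
    obtain ⟨hlt, hp, _⟩ := hf
    have heq : (bs.map pvText)[j] = PySem.Str.slice t none (some k) := by simpa using hp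
    rw [List.findIdx?_eq_none_iff] at hnone
    have := hnone _ (List.getElem_mem hlt)
    rw [heq] at this
    rw [pvQ_of_range t k hk.1 hk.2] at this
    exact absurd this (by simp)

theorem pvInner_some (bs : List (List (String × String))) (t : String) (j₀ : Nat)
    (hsome : (bs.map pvText).findIdx? (pvQ t) = some j₀) :
    ∃ (h : j₀ < (bs.map pvText).length),
      pvBestB (pvFirstIdx bs) t =
        some ((j₀ : Int), PySem.Str.len ((bs.map pvText)[j₀])) := by
  set texts := bs.map pvText with htexts
  rw [List.findIdx?_eq_some_iff_getElem] at hsome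
  obtain ⟨hj₀, hQ, hmin⟩ := hsome
  refine ⟨hj₀, ?_⟩
  set x := texts[j₀] with hx
  obtain ⟨hxeq, hk1, hk2⟩ := pvQ_char t x hQ
  -- membership facts: x's first index is j₀ itself
  have hfidx : texts.findIdx? (· == x) = some j₀ := by
    rw [List.findIdx?_eq_some_iff_getElem]
    refine ⟨hj₀, by simp [hx], fun j hj => ?_⟩
    intro hpj
    simp only [beq_iff_eq] at hpj
    exact hmin j hj (by rw [hpj]; exact hQ)
  -- g (len x) = some j₀
  have hg : (pvFirstIdx bs).get? (PySem.Str.slice t none (some (PySem.Str.len x))) =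
      some (j₀ : Int) := by
    rw [← hxeq, pvFirstIdx_get?, ← htexts, hfidx]
    rfl
  -- every hit of g is ≥ j₀ and determines its k
  have hhit : ∀ k ∈ PySem.List.pyRange 1 (PySem.Str.len t - 20) 1, ∀ i : Int,
      (pvFirstIdx bs).get? (PySem.Str.slice t none (some k)) = some i →
      ∃ j : Nat, i = (j : Int) ∧ (j₀ ≤ j) ∧ ∃ hjl : j < texts.length,
        texts[j] = PySem.Str.slice t none (some k) := by
    intro k hk i hgk
    rw [PySem.List.mem_pyRange_one] at hk
    rw [pvFirstIdx_get?, ← htexts] at hgk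
    cases hf : texts.findIdx? (· == PySem.Str.slice t none (some k)) with
    | none => rw [hf] at hgk; simp at hgk
    | some j =>
      rw [hf] at hgk
      simp only [Option.map_some, Option.some.injEq] at hgk
      rw [List.findIdx?_eq_some_iff_getElem] at hf
      obtain ⟨hjl, hpj, _⟩ := hf
      have heq : texts[j] = PySem.Str.slice t none (some k) := by simpa using hpj
      have hQj : pvQ t texts[j] = true := by
        rw [heq]; exact pvQ_of_range t k hk.1 hk.2
      have hj₀j : j₀ ≤ j := by
        by_contra hc
        exact hmin j (by omega) hQj
      exact ⟨j, hgk.symm, hj₀j, hjl, heq⟩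
  -- the fold is not none
  cases hres : pvBestB (pvFirstIdx bs) t with
  | none =>
    exfalso
    rw [pvBestB_eq, pvFold_none_iff] at hres
    have := hres.2 (PySem.Str.len x) (by rw [PySem.List.mem_pyRange_one]; exact ⟨hk1, hk2⟩)
    rw [this] at hg
    simp at hg
  | some r =>
    have hsrc := pvFold_some_src _ _ _ _ (pvBestB_eq _ _ ▸ hres)
    rcases hsrc with h' | ⟨hkmem, hgr⟩
    · simp at h'
    have hminf := pvFold_some_min _ _ _ _ (pvBestB_eq _ _ ▸ hres)
    -- r.1 ≤ j₀ via the pair (j₀, len x)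
    have hle1 : r.1 ≤ (j₀ : Int) :=
      hminf.2 (PySem.Str.len x)
        (by rw [PySem.List.mem_pyRange_one]; exact ⟨hk1, hk2⟩) _ hg
    -- r.1 ≥ j₀ and r determines its k
    obtain ⟨j, hij, hj₀j, hjl, hjeq⟩ := hhit r.2 hkmem r.1 hgr
    have hr1 : r.1 = (j₀ : Int) := by omega
    -- j = j₀
    have hjj₀ : j = j₀ := by omega
    simp only [hjj₀] at hjeq
    -- r.2 = len x
    have hkmem' := hkmem
    rw [PySem.List.mem_pyRange_one] at hkmem'
    have hxr : x = PySem.Str.slice t none (some r.2) := by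
      rw [hx]; exact hjeq
    have hlenx : PySem.Str.len x = r.2 := by
      have htl : x.toList = t.toList.take r.2.toNat := by
        rw [hxr]; exact pvPrefix_toList t r.2 hkmem'.1
      have hL : PySem.Str.len t = (t.toList.length : Int) := PySem.Str.len_eq t
      have hlen : x.toList.length = r.2.toNat := by
        rw [htl, List.length_take]; omega
      rw [PySem.Str.len_eq, hlen]
      omega
    have : r = ((j₀ : Int), PySem.Str.len x) := by
      cases r with
      | mk a b => simp only at hr1 hlenx ⊢; rw [hr1, hlenx]
    rw [this]

-- per-candidate step equality
theorem pvStep_eq (bs : List (List (String × String)))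
    (out : List (List (String × String))) (cand : List (String × String)) :
    (let text := pvText cand
     if ¬ (PySem.Set.contains (PySem.Set.ofList (bs.map (fun b => pvText b))) text = true) then
       out ++ [pvWithDelta cand "new"]
     else out ++ pvScanA text cand bs) =
    (let text := pvText cand
     if ¬ ((pvFirstIdx bs).contains text = true) then
       out ++ [pvWithDelta cand "new"]
     else
       match pvBestB (pvFirstIdx bs) text with
       | none => out
       | some b =>
         out ++ [pvWithDelta cand
           ("expanded:+" ++ PySem.Int.toStr (PySem.Str.len text - b.2))]) := by
  simp only
  set t := pvText cand with ht
  have hmem : (PySem.Set.contains (PySem.Set.ofList (bs.map (fun b => pvText b))) t = true) ↔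
      ((pvFirstIdx bs).contains t = true) := by
    rw [PySem.Set.contains_iff, PySem.Set.mem_ofList, pvFirstIdx_contains]
  by_cases hc : (pvFirstIdx bs).contains t = true
  · rw [if_neg (by rw [hmem]; simp [hc]), if_neg (by simp [hc])]
    rw [pvScanA_eq_find?]
    cases hf : (bs.map pvText).findIdx? (pvQ t) with
    | none =>
      rw [pvInner_none bs t hf]
      have : (bs.map pvText).find? (pvQ t) = none := by
        rw [List.find?_eq_none]
        rw [List.findIdx?_eq_none_iff] at hf
        intro x hx
        simp [hf x hx]
      rw [this]
      simp
    | some j₀ =>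
      obtain ⟨hjl, hbest⟩ := pvInner_some bs t j₀ hf
      rw [hbest]
      have hfind : (bs.map pvText).find? (pvQ t) = some ((bs.map pvText)[j₀]) := by
        rw [List.findIdx?_eq_some_iff_getElem] at hf
        obtain ⟨h1, h2, h3⟩ := hf
        rw [List.find?_eq_some_iff_getElem]
        exact ⟨h2, j₀, h1, rfl, fun j hj => by simpa using h3 j hj⟩
      rw [hfind]
  · rw [if_pos (by rw [hmem]; simp [hc]), if_pos (by simp [hc])]

theorem pvFold_eq (bs : List (List (String × String)))
    (as : List (List (String × String))) :
    ∀ out : List (List (String × String)),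
      as.foldl (fun out cand =>
        let text := pvText cand
        if ¬ (PySem.Set.contains (PySem.Set.ofList (bs.map (fun b => pvText b))) text = true) then
          out ++ [pvWithDelta cand "new"]
        else out ++ pvScanA text cand bs) out =
      as.foldl (fun out cand =>
        let text := pvText cand
        if ¬ ((pvFirstIdx bs).contains text = true) then
          out ++ [pvWithDelta cand "new"]
        else
          match pvBestB (pvFirstIdx bs) text with
          | none => out
          | some b =>
            out ++ [pvWithDelta cand
              ("expanded:+" ++ PySem.Int.toStr (PySem.Str.len text - b.2))]) out := by
  induction as with
  | nil => intro out; rfl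
  | cons c cs ih =>
    intro out
    simp only [List.foldl_cons]
    rw [pvStep_eq bs out c]
    exact ih _

-- ===== VERDICT (by name: the statement is the Claim_ definition above) =====
theorem diff_candidates_spec : Claim_equal_diff_candidates := by
  intro before after _
  unfold Spec_diff_candidates diff_candidates diff_candidates_alt
  exact pvFold_eq before after []
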